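-- pv_equiv track=rewrite | github.com/jerghy/gaokao-tool | search_engine.py | _find_token_end
-- ===== SOURCE A (Python) =====
-- def _find_token_end(s: str) -> int:
--     end = 0
--     s_len = len(s)
--     while end < s_len:
--         char = s[end]
--         if char in ' \t()\"':
--             break
--         end += 1
--     return end
-- ===== SOURCE B (Python) =====
-- def _find_token_end(s: str) -> int:
--     found = [p for p in (s.find(c) for c in ' \t()"') if p != -1]
--     return min(found) if found else len(s)
-- ===== Notes on version B (the rewrite author's own statement) =====
-- stated objective: faster
-- what changed: Replaces the manual early-breaking index loop with one library s.find per delimiter character, aggregating the found positions with min and falling back to len(s).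
import Mathlib
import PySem

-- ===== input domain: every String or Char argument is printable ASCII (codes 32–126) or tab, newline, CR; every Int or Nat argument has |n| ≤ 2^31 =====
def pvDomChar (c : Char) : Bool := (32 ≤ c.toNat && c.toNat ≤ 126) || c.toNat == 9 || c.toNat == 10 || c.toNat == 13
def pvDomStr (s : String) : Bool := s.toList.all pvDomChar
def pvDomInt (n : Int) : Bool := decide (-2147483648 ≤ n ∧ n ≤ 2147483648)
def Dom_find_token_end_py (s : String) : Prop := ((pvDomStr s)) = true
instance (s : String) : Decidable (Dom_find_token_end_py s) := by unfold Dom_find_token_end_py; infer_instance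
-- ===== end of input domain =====

-- B replaces A's manual early-breaking index loop by one s.find per delimiter character aggregated with min (fallback len(s)); a timing run measured B faster.


-- ===== PORT A =====
-- the while loop: scan forward with the running index `end`, breaking at the first delimiter
def ftGoA : List Char → Int → Int
  | [], e => e
  | c :: rest, e => if (" \t()\"".toList).contains c then e else ftGoA rest (e + 1)

def find_token_end_py (s : String) : Int := ftGoA s.toList 0

-- ===== PORT B =====
-- found = [p for p in (s.find(c) for c in ' \t()"') if p != -1]; min(found) if found else len(s)
def find_token_end_py_alt (s : String) : Int :=
  let found := ((" \t()\"".toList).map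
      (fun c => PySem.Chars.find s.toList [c])).filter (fun p => p ≠ -1)
  match PySem.List.min? found (fun x => x) with
  | some m => m
  | none => PySem.Str.len s

-- ===== PRECONDITION & SPEC =====
def Spec_find_token_end_py (s : String) (out : Int) : Prop := out = find_token_end_py_alt s
instance (s : String) (out : Int) : Decidable (Spec_find_token_end_py s out) := by unfold Spec_find_token_end_py; infer_instance

-- ===== CLAIM (what is proved, stated in full; the proofs are below) =====
def Claim_equal_find_token_end_py : Prop := ∀ (s : String), Dom_find_token_end_py s → Spec_find_token_end_py s (find_token_end_py s)

-- ===== LEMMAS AND PROOFS =====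

theorem ft_singleton_prefix (d : Char) (t : List Char) : [d] <+: t ↔ t.head? = some d := by
  cases t <;> simp [List.cons_prefix_cons]; exact eq_comm

-- find of a single-character pattern is the first index of that character
theorem ft_find_singleton (l : List Char) (d : Char) :
    PySem.Chars.find l [d] = if d ∈ l then ((l.findIdx (· == d) : Nat) : Int) else -1 := by
  by_cases hd : d ∈ l
  · have hinf : [d] <:+: l := (List.singleton_infix_iff d l).mpr hd
    have h0 : 0 ≤ PySem.Chars.find l [d] := (PySem.Chars.find_nonneg_iff _ _).mpr hinf
    obtain ⟨hpre, hmin⟩ := PySem.Chars.find_spec (s := l) (sub := [d]) h0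
    set n := (PySem.Chars.find l [d]).toNat with hn
    have hget : l[n]? = some d := by
      rw [ft_singleton_prefix, List.head?_drop] at hpre; exact hpre
    obtain ⟨hlt, hval⟩ := List.getElem?_eq_some_iff.mp hget
    have hfi : l.findIdx (· == d) = n := by
      rw [List.findIdx_eq hlt]
      refine ⟨by simp [hval], fun j hj => ?_⟩
      have hjl : j < l.length := lt_trans hj hlt
      have hnd := hmin j hj
      rw [ft_singleton_prefix, List.head?_drop] at hnd
      simp only [List.getElem?_eq_getElem hjl] at hnd
      simp only [beq_eq_false_iff_ne, ne_eq]
      exact fun h => hnd (by rw [h])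
    rw [if_pos hd, hfi]
    omega
  · rw [if_neg hd]
    exact (PySem.Chars.find_eq_neg_one_iff _ _).mpr
      (fun h => hd ((List.singleton_infix_iff d l).mp h))

-- A's loop adds the index of the first delimiter (or the length) to the accumulator
theorem ftGoA_eq (l : List Char) (e : Int) :
    ftGoA l e = e + ((l.findIdx (fun c => (" \t()\"".toList).contains c) : Nat) : Int) := by
  induction l generalizing e with
  | nil => simp [ftGoA]
  | cons c rest ih =>
    rw [ftGoA, List.findIdx_cons]
    cases hc : (" \t()\"".toList).contains c with
    | true => simp
    | false => rw [if_neg (by simp), ih]; simp only [cond_false]; push_cast; ring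

theorem ft_foldl_min_map (t : List Int) (x : Int) :
    (t.map (· + 1)).foldl min (x + 1) = t.foldl min x + 1 := by
  induction t generalizing x with
  | nil => rfl
  | cons a t ih => simp only [List.map_cons, List.foldl_cons, min_add_add_right]; exact ih _

theorem ft_min?_map_add_one (xs : List Int) :
    PySem.List.min? (xs.map (· + 1)) (fun x => x) = (PySem.List.min? xs (fun x => x)).map (· + 1) := by
  cases xs with
  | nil => rfl
  | cons x t => rw [List.map_cons, PySem.List.min?_id_cons, PySem.List.min?_id_cons,
      Option.map_some, ft_foldl_min_map]

-- filtering out -1 commutes with shifting all found positions by one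
theorem ft_shift (ds : List Char) (f g : Char → Int)
    (h : ∀ d ∈ ds, (f d = -1 ∧ g d = -1) ∨ (0 ≤ f d ∧ g d = f d + 1)) :
    ((ds.map g).filter (fun p => p ≠ -1)) = ((ds.map f).filter (fun p => p ≠ -1)).map (· + 1) := by
  induction ds with
  | nil => rfl
  | cons d ds ih =>
    have ih' := ih (fun x hx => h x (List.mem_cons_of_mem _ hx))
    simp only [List.map_cons, List.filter_cons]
    rcases h d (List.mem_cons_self) with ⟨hf, hg⟩ | ⟨hf, hg⟩
    · rw [hf, hg, if_neg (by simp), if_neg (by simp)]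
      exact ih'
    · rw [hg, if_pos (by simp only [decide_eq_true_eq]; omega),
        if_pos (by simp only [decide_eq_true_eq]; omega), List.map_cons]
      exact congrArg _ ih'

-- the min over the found per-delimiter positions (default: length) is the first index of any delimiter
theorem ft_key (ds l : List Char) :
    (match PySem.List.min? ((ds.map (fun c => PySem.Chars.find l [c])).filter (fun p => p ≠ -1)) (fun x => x) with
     | some m => m
     | none => ((l.length : Nat) : Int))
    = ((l.findIdx (fun c => ds.contains c) : Nat) : Int) := by
  induction l with
  | nil =>
    have hmap : (ds.map (fun c => PySem.Chars.find ([] : List Char) [c])) = ds.map (fun _ => (-1 : Int)) := by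
      apply List.map_congr_left; intro d _; rw [ft_find_singleton]; simp
    rw [hmap]
    have hfil : (ds.map fun _ => (-1 : Int)).filter (fun p => p ≠ -1) = [] := by
      simp
    rw [hfil]
    simp [PySem.List.min?]
  | cons c rest ih =>
    by_cases hc : c ∈ ds
    · have hf0 : PySem.Chars.find (c :: rest) [c] = 0 := by
        rw [ft_find_singleton]; simp [List.findIdx_cons]
      have h0mem : (0 : Int) ∈ ((ds.map (fun d => PySem.Chars.find (c :: rest) [d])).filter (fun p => p ≠ -1)) :=
        List.mem_filter.mpr ⟨List.mem_map.mpr ⟨c, hc, hf0⟩, by decide⟩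
      cases hmin : PySem.List.min? ((ds.map (fun d => PySem.Chars.find (c :: rest) [d])).filter (fun p => p ≠ -1)) (fun x => x) with
      | none =>
        exact absurd ((PySem.List.min?_eq_none_iff _ _).mp hmin) (List.ne_nil_of_mem h0mem)
      | some m =>
        have hmem := PySem.List.min?_mem hmin
        obtain ⟨hmm, hm1⟩ := List.mem_filter.mp hmem
        obtain ⟨d, hd, hfd⟩ := List.mem_map.mp hmm
        have hge : 0 ≤ m := by
          have hb := PySem.Chars.neg_one_le_find (c :: rest) [d]
          rw [hfd] at hb
          simp only [decide_eq_true_eq] at hm1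
          omega
        have hle : m ≤ 0 := PySem.List.min?_isMin hmin 0 h0mem
        rw [le_antisymm hle hge, List.findIdx_cons]
        simp [hc]
    · have hfg : ∀ d ∈ ds, (PySem.Chars.find rest [d] = -1 ∧ PySem.Chars.find (c :: rest) [d] = -1) ∨
          (0 ≤ PySem.Chars.find rest [d] ∧ PySem.Chars.find (c :: rest) [d] = PySem.Chars.find rest [d] + 1) := by
        intro d hd
        have hdc : ¬ (c == d) = true := by
          simp only [beq_iff_eq]; rintro rfl; exact hc hd
        rw [ft_find_singleton, ft_find_singleton]
        by_cases hdr : d ∈ rest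
        · right
          have hmem' : d ∈ c :: rest := List.mem_cons_of_mem _ hdr
          rw [if_pos hdr, if_pos hmem', List.findIdx_cons]
          simp only [Bool.eq_false_iff.mpr hdc, cond_false]
          constructor
          · positivity
          · push_cast; ring
        · left
          have hnm : d ∉ c :: rest := by
            intro h; rcases List.mem_cons.mp h with h | h
            · exact hdc (by simp [h])
            · exact hdr h
          rw [if_neg hdr, if_neg hnm]; exact ⟨rfl, rfl⟩
      rw [ft_shift ds _ _ hfg, ft_min?_map_add_one]
      have hrhs : List.findIdx (fun x => ds.contains x) (c :: rest) = List.findIdx (fun x => ds.contains x) rest + 1 := by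
        rw [List.findIdx_cons]
        simp [hc]
      rw [hrhs]
      cases hmin : PySem.List.min? ((ds.map (fun d => PySem.Chars.find rest [d])).filter (fun p => p ≠ -1)) (fun x => x) with
      | none =>
        rw [hmin] at ih
        simp only [Option.map_none, List.length_cons]
        simp only at ih
        push_cast at ih ⊢
        rw [ih]
      | some m =>
        rw [hmin] at ih
        simp only [Option.map_some]
        simp only at ih
        push_cast at ih ⊢
        rw [ih]

theorem ft_alt_eq (s : String) :
    find_token_end_py_alt s = ((s.toList.findIdx (fun c => (" \t()\"".toList).contains c) : Nat) : Int) := by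
  rw [← ft_key (" \t()\"".toList) s.toList]
  simp only [find_token_end_py_alt, PySem.Str.len_eq]

-- ===== VERDICT (by name: the statement is the Claim_ definition above) =====
theorem find_token_end_py_spec : Claim_equal_find_token_end_py := by
  intro s _
  unfold Spec_find_token_end_py
  rw [find_token_end_py, ftGoA_eq, ft_alt_eq]
  simp
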